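-- pv_equiv track=rewrite | github.com/Xu-Jiaqi/xu-jiaqi.github.io | scripts/daily_hf_papers.py | pick_sentence
-- ===== SOURCE A (Python) =====
-- from typing import Any, Dict, List
--
-- def pick_sentence(parts: List[str], keywords: List[str], used: set) -> str:
--     for s in parts:
--         low = s.lower()
--         if s in used:
--             continue
--         if any(k in low for k in keywords):
--             used.add(s)
--             return s
--
--     for s in parts:
--         if s not in used:
--             used.add(s)
--             return s
--
--     return ""
-- ===== SOURCE B (Python) =====
-- def pick_sentence(parts, keywords, used):
--     fallback = None
--     for s in parts:
--         if s in used: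
--             continue
--         if any(k in s.lower() for k in keywords):
--             used.add(s)
--             return s
--         if fallback is None:
--             fallback = s
--     if fallback is not None:
--         used.add(fallback)
--         return fallback
--     return ""
-- ===== Notes on version B (the rewrite author's own statement) =====
-- stated objective: alternative
-- what changed: Single pass over parts that records the first unused sentence as a fallback, instead of A's two separate passes.
import Mathlib
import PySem

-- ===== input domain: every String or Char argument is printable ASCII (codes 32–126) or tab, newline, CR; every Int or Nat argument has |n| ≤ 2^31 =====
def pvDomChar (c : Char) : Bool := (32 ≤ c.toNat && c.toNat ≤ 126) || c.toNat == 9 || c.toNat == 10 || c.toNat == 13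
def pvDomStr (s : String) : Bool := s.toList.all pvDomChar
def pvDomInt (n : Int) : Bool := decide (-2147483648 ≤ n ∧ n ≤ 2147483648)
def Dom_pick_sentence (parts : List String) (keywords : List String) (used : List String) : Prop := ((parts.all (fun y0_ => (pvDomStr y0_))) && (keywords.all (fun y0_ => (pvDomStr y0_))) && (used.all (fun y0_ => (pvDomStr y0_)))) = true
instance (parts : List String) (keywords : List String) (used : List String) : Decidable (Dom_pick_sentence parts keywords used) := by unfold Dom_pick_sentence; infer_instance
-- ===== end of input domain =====

-- B merges A's two passes over `parts` into one pass that records the first unused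
-- sentence as a fallback (objective: alternative decomposition, same cost). Both
-- Pythons mutate `used` identically; the equivalence proved is about the RETURN value.


-- ===== PORT A =====
-- A's first loop: first sentence not in `used` whose lowercase contains some keyword.
def pickA_loop1 (keywords : List String) (used : List String) : List String → Option String
  | [] => none
  | s :: rest =>
    let low := PySem.Str.lower s
    if used.contains s then pickA_loop1 keywords used rest
    else if keywords.any (fun k => PySem.Str.isIn k low) then some s
    else pickA_loop1 keywords used rest

-- A's second loop: first sentence not in `used`.
def pickA_loop2 (used : List String) : List String → Option String
  | [] => none
  | s :: rest => if used.contains s then pickA_loop2 used rest else some s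

def pick_sentence (parts : List String) (keywords : List String) (used : List String) : String :=
  match pickA_loop1 keywords used parts with
  | some s => s
  | none =>
    match pickA_loop2 used parts with
    | some s => s
    | none => ""

-- ===== PORT B =====
-- Single pass carrying the fallback (first unused sentence seen so far).
def pickB_loop (keywords : List String) (used : List String) (fallback : Option String) : List String → Option String
  | [] => fallback
  | s :: rest =>
    if used.contains s then pickB_loop keywords used fallback rest
    else if keywords.any (fun k => PySem.Str.isIn k (PySem.Str.lower s)) then some s
    else pickB_loop keywords used (if fallback.isNone then some s else fallback) rest

def pick_sentence_alt (parts : List String) (keywords : List String) (used : List String) : String :=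
  (pickB_loop keywords used none parts).getD ""

-- ===== PRECONDITION & SPEC =====
def Spec_pick_sentence (parts : List String) (keywords : List String) (used : List String) (out : String) : Prop := out = pick_sentence_alt parts keywords used
instance (parts : List String) (keywords : List String) (used : List String) (out : String) : Decidable (Spec_pick_sentence parts keywords used out) := by unfold Spec_pick_sentence; infer_instance

-- ===== CLAIM (what is proved, stated in full; the proofs are below) =====
def Claim_equal_pick_sentence : Prop := ∀ (parts : List String) (keywords : List String) (used : List String), Dom_pick_sentence parts keywords used → Spec_pick_sentence parts keywords used (pick_sentence parts keywords used)

-- ===== LEMMAS AND PROOFS =====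

-- Invariant of B's single loop: it returns the keyword match of A's first loop if any,
-- else the carried fallback, else the result of A's second loop.
lemma pickB_loop_eq (keywords used : List String) (parts : List String) :
    ∀ fb : Option String,
      pickB_loop keywords used fb parts =
        match pickA_loop1 keywords used parts with
        | some s => some s
        | none =>
          match fb with
          | some t => some t
          | none => pickA_loop2 used parts := by
  induction parts with
  | nil => intro fb; cases fb <;> rfl
  | cons s rest ih =>
    intro fb
    simp only [pickB_loop, pickA_loop1, pickA_loop2]
    by_cases hu : used.contains s
    · rw [if_pos hu, if_pos hu, if_pos hu, ih fb]
    · rw [if_neg hu, if_neg hu, if_neg hu]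
      by_cases hk : keywords.any (fun k => PySem.Str.isIn k (PySem.Str.lower s))
      · rw [if_pos hk, if_pos hk]
      · rw [if_neg hk, if_neg hk, ih]
        cases fb <;> simp

-- ===== VERDICT (by name: the statement is the Claim_ definition above) =====
theorem pick_sentence_spec : Claim_equal_pick_sentence := by
  intro parts keywords used _
  unfold Spec_pick_sentence pick_sentence pick_sentence_alt
  rw [pickB_loop_eq]
  cases pickA_loop1 keywords used parts <;> cases pickA_loop2 used parts <;> simp
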